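-- pv_equiv track=rewrite | github.com/GKDGKD/LeetCode | 牛客/remove_smallest_char.py | NS_String
-- ===== SOURCE A (Python) =====
-- def NS_String(s , k ):
--     temp    = sorted(set(s))
--     use_s   = temp[k:]
--     not_use = temp[:k]
--     res     = ''
--     for i in s:
--         if i not in not_use:
--             res += i
--
--     return res
-- ===== SOURCE B (Python) =====
-- def NS_String(s, k):
--     # B: same removal set (temp[:k], preserving negative-k slice semantics), but
--     # applied by repeated str.replace over the removal set instead of a
--     # membership-filtered pass over s.
--     temp = sorted(set(s))
--     not_use = temp[:k]
--     res = s
--     for c in not_use: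
--         res = res.replace(c, '')
--     return res
-- ===== Notes on version B (the rewrite author's own statement) =====
-- stated objective: alternative
-- what changed: B computes the same removal set temp[:k] but builds the result by iterating over the removal set with res = res.replace(c, '') instead of a single membership-filtered character scan over s.
import Mathlib
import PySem

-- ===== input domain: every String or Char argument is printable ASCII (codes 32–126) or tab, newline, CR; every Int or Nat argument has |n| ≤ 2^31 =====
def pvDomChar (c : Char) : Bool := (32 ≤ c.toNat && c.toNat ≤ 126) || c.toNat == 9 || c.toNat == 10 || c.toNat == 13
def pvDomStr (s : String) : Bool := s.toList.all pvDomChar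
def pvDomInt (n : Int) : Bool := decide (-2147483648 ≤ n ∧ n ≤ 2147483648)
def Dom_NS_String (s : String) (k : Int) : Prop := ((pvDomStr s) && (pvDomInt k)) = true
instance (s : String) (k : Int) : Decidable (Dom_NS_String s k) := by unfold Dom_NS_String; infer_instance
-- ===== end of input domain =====

-- B applies the same removal set temp[:k] by repeated full-string replaces instead of one membership-filtered scan over s (alternative decomposition, same cost).


-- ===== PORT A =====
def NS_String (s : String) (k : Int) : String :=
  let temp := PySem.List.sorted (PySem.Set.ofList s.toList) (fun x => x) false
  let _use_s := PySem.List.slice temp (some k) none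
  let not_use := PySem.List.slice temp none (some k)
  let res := s.toList.foldl (fun res i => if !(not_use.contains i) then res ++ [i] else res) ([] : List Char)
  String.ofList res

-- ===== PORT B =====
def NS_String_alt (s : String) (k : Int) : String :=
  let temp := PySem.List.sorted (PySem.Set.ofList s.toList) (fun x => x) false
  let not_use := PySem.List.slice temp none (some k)
  not_use.foldl (fun res c => PySem.Str.replace res (String.ofList [c]) "") s

-- ===== PRECONDITION & SPEC =====
def Spec_NS_String (s : String) (k : Int) (out : String) : Prop := out = NS_String_alt s k
instance (s : String) (k : Int) (out : String) : Decidable (Spec_NS_String s k out) := by unfold Spec_NS_String; infer_instance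

-- ===== CLAIM (what is proved, stated in full; the proofs are below) =====
def Claim_equal_NS_String : Prop := ∀ (s : String) (k : Int), Dom_NS_String s k → Spec_NS_String s k (NS_String s k)

-- ===== LEMMAS AND PROOFS =====

-- replace.go for a one-char pattern and empty replacement is a filter (with enough fuel)
theorem replace_go_single (c : Char) : ∀ (l : List Char) (fuel : Nat) (acc : List Char),
    l.length ≤ fuel →
    PySem.Chars.replace.go [c] [] fuel l acc = acc.reverse ++ l.filter (fun x => x != c) := by
  intro l
  induction l with
  | nil =>
    intro fuel acc _
    cases fuel <;> simp [PySem.Chars.replace.go]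
  | cons a t ih =>
    intro fuel acc hle
    cases fuel with
    | zero => simp at hle
    | succ f =>
      simp only [PySem.Chars.replace.go]
      by_cases h : a = c
      · subst h
        simp only [List.isPrefixOf, BEq.rfl, Bool.and_true, if_true,
          List.length_cons, List.length_nil, List.drop_succ_cons, List.drop_zero,
          List.reverse_nil, List.nil_append]
        rw [ih f acc (by simpa using Nat.le_of_succ_le_succ hle)]
        simp
      · have hpre : ([c].isPrefixOf (a :: t)) = false := by
          simp [List.isPrefixOf]
          exact fun hc => absurd hc.symm h
        rw [hpre]
        simp only [Bool.false_eq_true, if_false]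
        rw [ih f (a :: acc) (by simpa using Nat.le_of_succ_le_succ hle)]
        simp [h, bne]

-- replace with a one-char pattern and empty replacement is a filter
theorem replace_single (cs : List Char) (c : Char) :
    PySem.Chars.replace cs [c] [] = cs.filter (fun x => x != c) := by
  rw [PySem.Chars.replace]
  simp only [List.isEmpty_cons, Bool.false_eq_true, if_false]
  simpa using replace_go_single c cs cs.length [] le_rfl

-- folding replace over a list of characters filters out exactly those characters
theorem foldl_replace_filter : ∀ (L : List Char) (s : String),
    (L.foldl (fun res c => PySem.Str.replace res (String.ofList [c]) "") s).toList
      = s.toList.filter (fun x => !(L.contains x)) := by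
  intro L
  induction L with
  | nil => intro s; simp
  | cons c L ih =>
    intro s
    rw [List.foldl_cons, ih]
    have h1 : (PySem.Str.replace s (String.ofList [c]) "").toList
        = s.toList.filter (fun x => x != c) := by
      rw [PySem.Str.toList_replace]
      simpa using replace_single s.toList c
    rw [h1, List.filter_filter]
    apply List.filter_congr
    intro x _
    by_cases hx : x = c <;> simp [hx, Bool.and_comm]

-- ===== VERDICT (by name: the statement is the Claim_ definition above) =====
theorem NS_String_spec : Claim_equal_NS_String := by
  unfold Claim_equal_NS_String Spec_NS_String
  intro s k _
  unfold NS_String NS_String_alt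
  simp only []
  rw [PySem.List.foldl_append_if_eq_filter]
  have h := foldl_replace_filter
    (PySem.List.slice (PySem.List.sorted (PySem.Set.ofList s.toList) (fun x => x) false) none (some k)) s
  apply String.ext  -- equal data
  rw [h]
  simp
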